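-- pv_equiv track=rewrite | github.com/prettyleka/pycheckIO_EDU | Scientific Expedition/Caps Lock/mission.py | caps_lock
-- ===== SOURCE A (Python) =====
-- def caps_lock(text: str) -> str:
--     newL=[]
--     count=0
--     i=0
--     while i<len(text):
--         if count==0:
--             if text[i]!="a":
--                 newL.append(text[i])
--                 i+=1
--             else:
--                 count+=1
--                 i+=1
--         elif count == 1:
--             if text[i]!="a":
--                 newL.append(text[i].capitalize())
--                 i+=1
--             else:
--                 count=0
--                 i+=1
--     w="".join(newL)
--     return w
-- ===== SOURCE B (Python) =====
-- def caps_lock(text: str) -> str: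
--     parts = text.split('a')
--     out = []
--     for i, part in enumerate(parts):
--         out.append(part if i % 2 == 0 else ''.join(c.capitalize() for c in part))
--     return ''.join(out)
-- ===== Notes on version B (the rewrite author's own statement) =====
-- stated objective: simpler
-- what changed: Replaced the index-and-toggle-counter while-loop state machine by splitting the text at the toggle character and per-character-capitalizing the odd-indexed segments.
import Mathlib
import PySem

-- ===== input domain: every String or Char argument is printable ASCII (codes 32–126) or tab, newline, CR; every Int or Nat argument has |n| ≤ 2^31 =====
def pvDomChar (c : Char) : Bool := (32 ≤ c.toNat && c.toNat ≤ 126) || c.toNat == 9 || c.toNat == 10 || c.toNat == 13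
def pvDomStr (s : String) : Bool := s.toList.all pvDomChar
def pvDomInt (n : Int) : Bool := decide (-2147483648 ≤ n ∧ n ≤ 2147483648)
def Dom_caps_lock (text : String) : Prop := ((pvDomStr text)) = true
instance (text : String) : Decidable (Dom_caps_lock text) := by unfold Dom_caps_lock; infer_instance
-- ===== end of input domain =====

-- B replaces A's index-and-toggle-counter state machine by split('a') and
-- per-character capitalization of the odd-indexed segments (objective: simpler).

-- ===== PORT A =====
-- A's while loop over i with the 0/1 toggle `count`, as recursion over the chars;
-- text[i].capitalize() on a one-char ASCII string is exactly Chars.upperChar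
def capsLoopA (count : Nat) : List Char → List Char
  | [] => []
  | c :: rest =>
    if count = 0 then
      if c ≠ 'a' then c :: capsLoopA 0 rest else capsLoopA 1 rest
    else
      if c ≠ 'a' then PySem.Chars.upperChar c :: capsLoopA 1 rest else capsLoopA 0 rest

def caps_lock (text : String) : String :=
  String.ofList (capsLoopA 0 text.toList)

-- ===== PORT B =====
-- parts = text.split('a'); the loop over enumerate(parts) keeps even-index parts
-- and capitalizes odd-index parts per character; ''.join at the end
def caps_lock_alt (text : String) : String :=
  String.ofList (PySem.Chars.join []
    ((PySem.List.enumerate (PySem.Chars.splitOn text.toList ['a']) 0).map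
      (fun ip => if PySem.Int.mod ip.1 2 == 0 then ip.2 else ip.2.map PySem.Chars.upperChar)))

-- ===== PRECONDITION & SPEC =====
def Spec_caps_lock (text : String) (out : String) : Prop := out = caps_lock_alt text
instance (text : String) (out : String) : Decidable (Spec_caps_lock text out) := by unfold Spec_caps_lock; infer_instance

-- ===== CLAIM (what is proved, stated in full; the proofs are below) =====
def Claim_equal_caps_lock : Prop := ∀ (text : String), Dom_caps_lock text → Spec_caps_lock text (caps_lock text)

-- ===== LEMMAS AND PROOFS =====

-- structural characterization of split on the single character 'a'
def fSplit : List Char → List (List Char)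
  | [] => [[]]
  | c :: rest => if c = 'a' then [] :: fSplit rest else (fSplit rest).modifyHead (c :: ·)

theorem fSplit_ne_nil (cs : List Char) : fSplit cs ≠ [] := by
  induction cs with
  | nil => simp [fSplit]
  | cons c rest ih =>
    simp only [fSplit]
    split_ifs
    · simp
    · cases h : fSplit rest with
      | nil => exact absurd h ih
      | cons p ps => simp [List.modifyHead]

theorem splitOn_go_eq (cs : List Char) : ∀ (fuel : Nat) (cur : List Char) (acc : List (List Char)),
    cs.length ≤ fuel →
    PySem.Chars.splitOn.go ['a'] fuel cs cur acc
      = acc.reverse ++ (fSplit cs).modifyHead (cur.reverse ++ ·) := by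
  induction cs with
  | nil =>
    intro fuel cur acc _
    cases fuel <;> simp [PySem.Chars.splitOn.go, fSplit, List.modifyHead]
  | cons c rest ih =>
    intro fuel cur acc h
    cases fuel with
    | zero => simp at h
    | succ fuel' =>
      by_cases hc : c = 'a'
      · subst hc
        have hpre : List.isPrefixOf ['a'] ('a' :: rest) = true := by
          simp [List.isPrefixOf]
        rw [PySem.Chars.splitOn.go]
        simp only [hpre, if_pos]
        rw [show List.drop (List.length ['a']) ('a' :: rest) = rest by simp]
        rw [ih fuel' [] (cur.reverse :: acc) (by simp at h; omega)]
        cases hfs : fSplit rest with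
        | nil => exact absurd hfs (fSplit_ne_nil rest)
        | cons p ps => simp [fSplit, hfs, List.modifyHead]
      · have hpre : List.isPrefixOf ['a'] (c :: rest) = false := by
          simp [List.isPrefixOf]; intro h'; exact absurd h'.symm hc
        rw [PySem.Chars.splitOn.go]
        simp only [hpre, Bool.false_eq_true, if_neg, not_false_iff]
        rw [ih fuel' (c :: cur) acc (by simp at h; omega)]
        cases hfs : fSplit rest with
        | nil => exact absurd hfs (fSplit_ne_nil rest)
        | cons p ps => simp [fSplit, hc, hfs, List.modifyHead]

theorem splitOn_eq_fSplit (cs : List Char) :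
    PySem.Chars.splitOn cs ['a'] = fSplit cs := by
  unfold PySem.Chars.splitOn
  rw [splitOn_go_eq cs (cs.length + 1) [] [] (by omega)]
  cases hfs : fSplit cs <;> simp [List.modifyHead]

-- the alternating concatenation both sides compute
def altJoinB : Bool → List (List Char) → List Char
  | _, [] => []
  | odd, p :: ps => (if odd then p.map PySem.Chars.upperChar else p) ++ altJoinB (!odd) ps

theorem join_nil_cons (p : List Char) (ps : List (List Char)) :
    PySem.Chars.join [] (p :: ps) = p ++ PySem.Chars.join [] ps := by
  cases ps <;> simp [PySem.Chars.join, List.intercalate]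

theorem enum_join_eq_altJoinB (parts : List (List Char)) :
    ∀ (k : Int), 0 ≤ k →
    PySem.Chars.join [] ((PySem.List.enumerate parts k).map
      (fun ip => if PySem.Int.mod ip.1 2 == 0 then ip.2 else ip.2.map PySem.Chars.upperChar))
      = altJoinB (k % 2 == 1) parts := by
  induction parts with
  | nil => intro k _; simp [PySem.List.enumerate_nil, altJoinB, PySem.Chars.join, List.intercalate]
  | cons p ps ih =>
    intro k hk
    rw [PySem.List.enumerate_cons, List.map_cons, join_nil_cons, ih (k + 1) (by omega)]
    have hf : PySem.Int.mod k 2 = k % 2 := by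
      simp [PySem.Int.mod, Int.fmod_eq_emod]
    have h2 : k % 2 = 0 ∨ k % 2 = 1 := by omega
    rcases h2 with h | h
    · rw [show (k + 1) % 2 = 1 by omega]
      simp [h, altJoinB]
    · rw [show (k + 1) % 2 = 0 by omega]
      simp [h, altJoinB]

theorem capsLoopA_eq_altJoinB (cs : List Char) :
    ∀ (odd : Bool), capsLoopA (if odd then 1 else 0) cs = altJoinB odd (fSplit cs) := by
  induction cs with
  | nil => intro odd; cases odd <;> simp [capsLoopA, fSplit, altJoinB]
  | cons c rest ih =>
    intro odd
    by_cases hc : c = 'a'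
    · subst hc
      have := ih (!odd)
      cases odd <;> simpa [capsLoopA, fSplit, altJoinB] using this
    · cases hfs : fSplit rest with
      | nil => exact absurd hfs (fSplit_ne_nil rest)
      | cons h t =>
        have := ih odd
        rw [hfs] at this
        cases odd <;>
          simp_all [capsLoopA, fSplit, altJoinB, List.modifyHead]

-- ===== VERDICT (by name: the statement is the Claim_ definition above) =====
theorem caps_lock_spec : Claim_equal_caps_lock := by
  intro text _
  unfold Spec_caps_lock caps_lock caps_lock_alt
  rw [splitOn_eq_fSplit, enum_join_eq_altJoinB _ 0 (by norm_num)]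
  have := capsLoopA_eq_altJoinB text.toList false
  simpa using congrArg String.ofList this
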